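-- pv_equiv track=rewrite | github.com/vaishu-2805/CPU-Scheduling | proirity.py | priority_non_preemptive
-- ===== SOURCE A (Python) =====
-- def priority_non_preemptive(processes, arrivalTime, burstTime, priority):
--     n = len(processes)
--     waitingTime = [0] * n
--     startTime = [0] * n
--     completed = [False] * n
--     currentTime = 0
--     completedCount = 0
--
--     while completedCount < n:
--         idx = -1
--         highestPriority = float('inf')
--
--         # Find the process with the highest priority among arrived processes
--         for i in range(n):
--             if not completed[i] and arrivalTime[i] <= currentTime and priority[i] < highestPriority:
--                 highestPriority = priority[i]
--                 idx = i
--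
--         if idx == -1:
--             currentTime += 1
--             continue
--
--         startTime[idx] = currentTime
--         waitingTime[idx] = currentTime - arrivalTime[idx]
--         currentTime += burstTime[idx]
--         completed[idx] = True
--         completedCount += 1
--
--     return waitingTime, startTime
-- ===== SOURCE B (Python) =====
-- def priority_non_preemptive(processes, arrivalTime, burstTime, priority):
--     # Event-driven: keep the un-scheduled indices and, when nothing has arrived,
--     # jump the clock to the next arrival instead of stepping one unit at a time.
--     n = len(processes)
--     waitingTime = [0] * n
--     startTime = [0] * n
--     remaining = list(range(n))
--     t = 0
--     while remaining:
--         ready = [i for i in remaining if arrivalTime[i] <= t]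
--         if not ready:
--             t = min(arrivalTime[i] for i in remaining)
--             ready = [i for i in remaining if arrivalTime[i] <= t]
--         j = min(ready, key=lambda i: (priority[i], i))
--         remaining.remove(j)
--         startTime[j] = t
--         waitingTime[j] = t - arrivalTime[j]
--         t += burstTime[j]
--     return waitingTime, startTime
-- ===== Notes on version B (the rewrite author's own statement) =====
-- stated objective: alternative
-- what changed: B drops A's unit time-stepping and completed[] boolean scan: it keeps the list of unscheduled indices, jumps the clock directly to the earliest remaining arrival when nothing is ready, and picks min(ready, key=(priority, index)); A instead increments currentTime by 1 and rescans all n processes every loop iteration.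
import Mathlib
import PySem

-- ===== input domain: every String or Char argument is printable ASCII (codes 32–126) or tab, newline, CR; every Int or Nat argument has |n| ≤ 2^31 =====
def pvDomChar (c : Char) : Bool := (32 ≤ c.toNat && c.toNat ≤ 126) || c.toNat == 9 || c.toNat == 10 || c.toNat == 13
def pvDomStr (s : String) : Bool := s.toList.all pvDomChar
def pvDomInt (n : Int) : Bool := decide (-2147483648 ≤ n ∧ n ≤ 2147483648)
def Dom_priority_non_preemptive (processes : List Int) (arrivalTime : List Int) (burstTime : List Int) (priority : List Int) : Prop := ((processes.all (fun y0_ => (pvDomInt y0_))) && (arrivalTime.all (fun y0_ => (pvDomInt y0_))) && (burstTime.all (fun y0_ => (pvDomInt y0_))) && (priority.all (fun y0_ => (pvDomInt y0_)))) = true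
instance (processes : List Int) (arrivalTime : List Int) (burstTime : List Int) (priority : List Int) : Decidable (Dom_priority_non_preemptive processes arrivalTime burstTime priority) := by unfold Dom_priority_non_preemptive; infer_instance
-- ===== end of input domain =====

-- B replaces A's unit time-stepping while-loop over a `completed` boolean array by an
-- event-driven loop over the list of unscheduled indices that jumps the clock straight
-- to the next arrival instead of ticking one unit at a time (objective: alternative).

-- ===== PORT A =====
-- `highestPriority` starts as float('inf'): `none` below plays the role of +infinity.
def pvLtInf (x : Int) (hp : Option Int) : Bool :=
  match hp with
  | none => true
  | some h => decide (x < h)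

-- one iteration of A's inner `for i in range(n)` scan; state = (idx, highestPriority)
def pvScanStep (arrival prio : List Int) (completed : List Bool) (t : Int)
    (s : Option Nat × Option Int) (i : Nat) : Option Nat × Option Int :=
  if (!completed.getD i false && decide (arrival.getD i 0 ≤ t)) && pvLtInf (prio.getD i 0) s.2 then
    (some i, some (prio.getD i 0))
  else s

-- A's inner scan: find the arrived uncompleted process with the smallest priority (first wins)
def pvScan (n : Nat) (arrival prio : List Int) (completed : List Bool) (t : Int) :
    Option Nat × Option Int :=
  (List.range n).foldl (pvScanStep arrival prio completed t) (none, none)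

-- facts about the scan that A's loop needs for its invariant and termination
lemma pvScan_some (n : Nat) (arrival prio : List Int) (completed : List Bool) (t : Int)
    {j : Nat} (h : (pvScan n arrival prio completed t).1 = some j) :
    j < n ∧ completed.getD j false = false ∧ arrival.getD j 0 ≤ t := by
  have main : ∀ j, (pvScan n arrival prio completed t).1 = some j →
      j < n ∧ completed.getD j false = false ∧ arrival.getD j 0 ≤ t := by
    unfold pvScan
    refine List.foldlRecOn
      (motive := fun (s : Option Nat × Option Int) => ∀ j, s.1 = some j →
        j < n ∧ completed.getD j false = false ∧ arrival.getD j 0 ≤ t)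
      (List.range n) _ (by intro j hj; simp at hj) ?_
    intro b hb i hi j hj
    unfold pvScanStep at hj
    split at hj
    · rename_i hcond
      simp only [Prod.fst] at hj
      cases hj
      simp only [Bool.and_eq_true, Bool.not_eq_eq_eq_not, Bool.not_true, decide_eq_true_eq] at hcond
      exact ⟨List.mem_range.mp hi, hcond.1.1, hcond.1.2⟩
    · exact hb j hj
  exact main j h

lemma pvScan_none (n : Nat) (arrival prio : List Int) (completed : List Bool) (t : Int)
    (h : (pvScan n arrival prio completed t).1 = none) :
    ∀ i, i < n → completed.getD i false = false → t < arrival.getD i 0 := by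
  intro i hi hu
  by_contra hnt
  push_neg at hnt
  obtain ⟨l1, l2, hsplit⟩ := List.append_of_mem (List.mem_range.mpr hi)
  have hiff : ∀ s : Option Nat × Option Int, s.1.isSome = s.2.isSome →
      (List.foldl (pvScanStep arrival prio completed t) s l1).1.isSome =
        (List.foldl (pvScanStep arrival prio completed t) s l1).2.isSome := by
    intro s hs
    refine List.foldlRecOn (motive := fun (s : Option Nat × Option Int) => s.1.isSome = s.2.isSome) l1 _ hs ?_
    intro b hb a _
    unfold pvScanStep
    split <;> simp [hb]
  have h1 := hiff (none, none) rfl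
  set s1 := List.foldl (pvScanStep arrival prio completed t) (none, none) l1 with hs1
  have hstep : (pvScanStep arrival prio completed t s1 i).1.isSome = true := by
    rcases h2 : s1.2 with _ | hp
    · rw [List.getD_eq_getElem?_getD] at hu hnt
      simp [pvScanStep, h2, pvLtInf, hu, hnt]
    · have hsome : s1.1.isSome := by rw [h1, h2]; rfl
      unfold pvScanStep
      split
      · rfl
      · exact hsome
  have hkeep : (List.foldl (pvScanStep arrival prio completed t)
      (pvScanStep arrival prio completed t s1 i) l2).1.isSome = true := by
    refine List.foldlRecOn (motive := fun (s : Option Nat × Option Int) => s.1.isSome = true)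
      l2 _ hstep ?_
    intro b hb a _
    unfold pvScanStep
    split
    · rfl
    · exact hb
  rw [pvScan, hsplit, List.foldl_append, List.foldl_cons] at h
  rw [← hs1] at h
  rw [h] at hkeep
  exact Bool.false_ne_true hkeep

lemma pvExistsFalse (completed : List Bool) (count : Nat)
    (hcount : completed.count true = count) (hlt : count < completed.length) :
    ∃ i, i < completed.length ∧ completed.getD i false = false := by
  by_contra hno
  push_neg at hno
  have hall : ∀ b ∈ completed, true = b := by
    intro b hb
    obtain ⟨i, hil, hbi⟩ := List.mem_iff_getElem.mp hb
    have := hno i hil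
    rw [List.getD_eq_getElem?_getD, List.getElem?_eq_getElem hil] at this
    simp only [Option.getD_some] at this
    cases b
    · exact absurd (hbi ▸ this) (by simp)
    · rfl
  have := List.count_eq_length.mpr hall
  omega

lemma pvCountSetTrue (l : List Bool) (j : Nat) (hj : j < l.length)
    (hf : l.getD j false = false) : (l.set j true).count true = l.count true + 1 := by
  induction l generalizing j with
  | nil => simp at hj
  | cons b tl ih =>
    cases j with
    | zero =>
      simp only [List.getD_cons_zero] at hf
      subst hf
      simp [List.count_cons]
    | succ k =>
      simp only [List.length_cons, Nat.succ_lt_succ_iff] at hj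
      simp only [List.getD_cons_succ] at hf
      simp [List.count_cons, ih k hj hf]
      omega

-- the earliest arrival among uncompleted processes (termination measure helper)
def pvMinArr (n : Nat) (arrival : List Int) (completed : List Bool) : Int :=
  ((((List.range n).filter (fun i => !completed.getD i false)).map
      (fun i => arrival.getD i 0)).min?).getD 0

lemma pvMinArr_gt (n : Nat) (arrival prio : List Int) (completed : List Bool) (t : Int)
    (count : Nat) (hlen : completed.length = n) (hcount : completed.count true = count)
    (hc : count < n) (h : (pvScan n arrival prio completed t).1 = none) :
    t < pvMinArr n arrival completed := by
  obtain ⟨i0, hi0, hf0⟩ := pvExistsFalse completed count hcount (by omega)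
  have hi0n : i0 < n := by omega
  have hmem0 : i0 ∈ (List.range n).filter (fun i => !completed.getD i false) :=
    List.mem_filter.mpr ⟨List.mem_range.mpr hi0n, by rw [List.getD_eq_getElem?_getD] at hf0; simp [hf0]⟩
  set L := ((List.range n).filter (fun i => !completed.getD i false)).map
    (fun i => arrival.getD i 0) with hL
  have hneL : L ≠ [] := by
    simp only [hL, ne_eq, List.map_eq_nil_iff]
    intro hnil
    rw [hnil] at hmem0
    exact (List.not_mem_nil).elim hmem0
  rcases hm : L.min? with _ | m
  · exact absurd (List.min?_eq_none_iff.mp hm) hneL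
  · obtain ⟨hmL, _⟩ := List.min?_eq_some_iff.mp hm
    obtain ⟨i1, hi1, hval⟩ := List.mem_map.mp hmL
    obtain ⟨hi1r, hi1u⟩ := List.mem_filter.mp hi1
    have hu1 : completed.getD i1 false = false := by simpa using hi1u
    have := pvScan_none n arrival prio completed t h i1 (List.mem_range.mp hi1r) hu1
    unfold pvMinArr
    rw [← hL, hm]
    simp only [Option.getD_some]
    rw [← hval]
    exact this

-- A's while-loop; the two proof arguments record A's loop invariant
-- (they are needed only so that Lean can see the loop terminates; Python A terminates likewise)
def pvALoop (n : Nat) (arrival burst prio : List Int) (waiting start : List Int)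
    (completed : List Bool) (t : Int) (count : Nat)
    (hlen : completed.length = n) (hcount : completed.count true = count) :
    List Int × List Int :=
  if hc : count < n then
    match hidx : (pvScan n arrival prio completed t).1 with
    | some i =>
        pvALoop n arrival burst prio
          (waiting.set i (t - arrival.getD i 0)) (start.set i t)
          (completed.set i true) (t + burst.getD i 0) (count + 1)
          (by simpa using hlen)
          (by
            obtain ⟨hi, hf, _⟩ := pvScan_some n arrival prio completed t hidx
            rw [pvCountSetTrue completed i (by omega) hf, hcount])
    | none =>
        pvALoop n arrival burst prio waiting start completed (t + 1) count hlen hcount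
  else (waiting, start)
termination_by (n - count, (pvMinArr n arrival completed - t).toNat)
decreasing_by
  · exact Prod.Lex.left _ _ (by omega)
  · have hgt := pvMinArr_gt n arrival prio completed t count hlen hcount hc hidx
    exact Prod.Lex.right _ (by omega)

def priority_non_preemptive (processes : List Int) (arrivalTime : List Int)
    (burstTime : List Int) (priority : List Int) : List Int × List Int :=
  let n := processes.length
  pvALoop n arrivalTime burstTime priority
    (List.replicate n 0) (List.replicate n 0) (List.replicate n false) 0 0
    (by simp) (by simp [List.count_replicate])

-- ===== PORT B =====
lemma pvRemoveLen {xs : List Nat} {v : Nat} {r : List Nat}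
    (h : PySem.List.remove? xs v = some r) : r.length < xs.length := by
  by_cases hm : v ∈ xs
  · rw [PySem.List.remove?_eq_some_erase xs v hm] at h
    cases h
    have := List.length_erase_of_mem hm
    have : 0 < xs.length := List.length_pos_of_mem hm
    omega
  · rw [(PySem.List.remove?_eq_none_iff xs v).mpr hm] at h
    cases h

-- B's while-loop over the list of not-yet-scheduled indices
def pvBLoop (arrival burst prio : List Int) (waiting start : List Int)
    (remaining : List Nat) (t : Int) : List Int × List Int :=
  match remaining with
  | [] => (waiting, start)
  | x :: rest =>
    let remaining := x :: rest
    let ready := remaining.filter (fun i => decide (arrival.getD i 0 ≤ t))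
    -- if no process has arrived, jump the clock to the earliest remaining arrival
    let p :=
      if ready.isEmpty then
        let m := ((remaining.map (fun i => arrival.getD i 0)).min?).getD 0
        (m, remaining.filter (fun i => decide (arrival.getD i 0 ≤ m)))
      else (t, ready)
    match PySem.List.min2? p.2 (fun i => prio.getD i 0) (fun i => i) with
    | none => (waiting, start)      -- unreachable (Python's min on the nonempty ready list)
    | some j =>
      match hrem : PySem.List.remove? remaining j with
      | none => (waiting, start)    -- unreachable (j is drawn from remaining)
      | some rem =>
        pvBLoop arrival burst prio
          (waiting.set j (p.1 - arrival.getD j 0)) (start.set j p.1)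
          rem (p.1 + burst.getD j 0)
termination_by remaining.length
decreasing_by exact pvRemoveLen hrem

def priority_non_preemptive_alt (processes : List Int) (arrivalTime : List Int)
    (burstTime : List Int) (priority : List Int) : List Int × List Int :=
  let n := processes.length
  pvBLoop arrivalTime burstTime priority
    (List.replicate n 0) (List.replicate n 0) (List.range n) 0

-- ===== PRECONDITION & SPEC =====
-- Pre_ excludes exactly the inputs on which Python A raises IndexError:
-- when arrivalTime, burstTime or priority is shorter than processes.
def Pre_priority_non_preemptive (processes : List Int) (arrivalTime : List Int)
    (burstTime : List Int) (priority : List Int) : Prop :=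
  processes.length ≤ arrivalTime.length ∧ processes.length ≤ burstTime.length ∧
    processes.length ≤ priority.length
instance (processes : List Int) (arrivalTime : List Int) (burstTime : List Int) (priority : List Int) : Decidable (Pre_priority_non_preemptive processes arrivalTime burstTime priority) := by unfold Pre_priority_non_preemptive; infer_instance

def pvWitness_priority_non_preemptive : List Int × List Int × List Int × List Int :=
  ([1, 2, 3], [0, 5, 1], [4, 2, 3], [2, 1, 3])

def Spec_priority_non_preemptive (processes : List Int) (arrivalTime : List Int) (burstTime : List Int) (priority : List Int) (out : List Int × List Int) : Prop := out = priority_non_preemptive_alt processes arrivalTime burstTime priority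
instance (processes : List Int) (arrivalTime : List Int) (burstTime : List Int) (priority : List Int) (out : List Int × List Int) : Decidable (Spec_priority_non_preemptive processes arrivalTime burstTime priority out) := by unfold Spec_priority_non_preemptive; infer_instance

-- ===== CLAIM (what is proved, stated in full; the proofs are below) =====
def Claim_equal_priority_non_preemptive : Prop := ∀ (processes : List Int) (arrivalTime : List Int) (burstTime : List Int) (priority : List Int), Dom_priority_non_preemptive processes arrivalTime burstTime priority → Pre_priority_non_preemptive processes arrivalTime burstTime priority → Spec_priority_non_preemptive processes arrivalTime burstTime priority (priority_non_preemptive processes arrivalTime burstTime priority)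

-- ===== LEMMAS AND PROOFS =====

-- the uncompleted indices, in increasing order: B's `remaining`
def pvR (n : Nat) (completed : List Bool) : List Nat :=
  (List.range n).filter (fun i => !completed.getD i false)

lemma pvR_nodup (n : Nat) (completed : List Bool) : (pvR n completed).Nodup :=
  (List.nodup_range).filter _

-- A's scan, restricted to the eligible indices (helper for pvScan_eq_min2?)
def pvSelStep (prio : List Int) (s : Option Nat × Option Int) (i : Nat) :
    Option Nat × Option Int :=
  if pvLtInf (prio.getD i 0) s.2 then (some i, some (prio.getD i 0)) else s

-- the fold behind PySem.List.min2? with key (priority[i], i)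
def pvBStep (prio : List Int) (acc : Option Nat) (x : Nat) : Option Nat :=
  match acc with
  | none => some x
  | some m =>
    if (decide (prio.getD x 0 < prio.getD m 0) ||
        !decide (prio.getD m 0 < prio.getD x 0) && decide (x < m)) = true then some x
    else some m

lemma pvMin2_eq_foldl (prio : List Int) (E : List Nat) :
    PySem.List.min2? E (fun i => prio.getD i 0) (fun i => i) = E.foldl (pvBStep prio) none := by
  unfold PySem.List.min2?
  congr 1
  funext acc x
  cases acc <;> rfl

lemma pvScan_as_filter (n : Nat) (arrival prio : List Int) (completed : List Bool) (t : Int) :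
    pvScan n arrival prio completed t =
      ((List.range n).filter
        (fun i => !completed.getD i false && decide (arrival.getD i 0 ≤ t))).foldl
        (pvSelStep prio) (none, none) := by
  rw [List.foldl_filter]
  unfold pvScan
  congr 1
  funext s i
  unfold pvScanStep pvSelStep
  cases h1 : (!completed.getD i false && decide (arrival.getD i 0 ≤ t)) <;>
    cases h2 : pvLtInf (prio.getD i 0) s.2 <;> simp [h1, h2]

-- on a strictly index-increasing list, A's first-strict-improvement fold and Python's
-- min(…, key=(priority, index)) fold move in lockstep
lemma pvSelFold (prio : List Int) :
    ∀ (E : List Nat), E.Pairwise (· < ·) → ∀ (a : Option Nat × Option Int) (b : Option Nat),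
      (a = (none, none) ∧ b = none ∨
        ∃ i, a = (some i, some (prio.getD i 0)) ∧ b = some i ∧ ∀ x ∈ E, i < x) →
      (E.foldl (pvSelStep prio) a).1 = E.foldl (pvBStep prio) b := by
  intro E
  induction E with
  | nil =>
    intro _ a b hinv
    rcases hinv with ⟨ha, hb⟩ | ⟨i, ha, hb, _⟩ <;> subst ha <;> subst hb <;> rfl
  | cons x E' ih =>
    intro hpw a b hinv
    have hx : ∀ y ∈ E', x < y := (List.pairwise_cons.mp hpw).1
    have hpw' := (List.pairwise_cons.mp hpw).2
    simp only [List.foldl_cons]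
    rcases hinv with ⟨ha, hb⟩ | ⟨i, ha, hb, hlt⟩
    · subst ha; subst hb
      have h1 : pvSelStep prio (none, none) x = (some x, some (prio.getD x 0)) := by
        simp [pvSelStep, pvLtInf]
      have h2 : pvBStep prio none x = some x := rfl
      rw [h1, h2]
      exact ih hpw' _ _ (Or.inr ⟨x, rfl, rfl, hx⟩)
    · subst ha; subst hb
      have hxi : ¬ x < i := by
        have := hlt x (List.mem_cons_self ..)
        omega
      by_cases hp : prio.getD x 0 < prio.getD i 0
      · have h1 : pvSelStep prio (some i, some (prio.getD i 0)) x =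
            (some x, some (prio.getD x 0)) := by
          unfold pvSelStep pvLtInf
          rw [if_pos (decide_eq_true hp)]
        have h2 : pvBStep prio (some i) x = some x := by
          show (if (decide (prio.getD x 0 < prio.getD i 0) ||
              !decide (prio.getD i 0 < prio.getD x 0) && decide (x < i)) = true then some x
            else some i) = some x
          rw [if_pos]
          rw [decide_eq_true hp, Bool.true_or]
        rw [h1, h2]
        exact ih hpw' _ _ (Or.inr ⟨x, rfl, rfl, hx⟩)
      · have h1 : pvSelStep prio (some i, some (prio.getD i 0)) x =
            (some i, some (prio.getD i 0)) := by
          unfold pvSelStep pvLtInf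
          rw [if_neg]
          simpa using hp
        have h2 : pvBStep prio (some i) x = some i := by
          show (if (decide (prio.getD x 0 < prio.getD i 0) ||
              !decide (prio.getD i 0 < prio.getD x 0) && decide (x < i)) = true then some x
            else some i) = some i
          rw [if_neg]
          simp only [List.getD_eq_getElem?_getD] at hp
          simp [hxi]
          omega
        rw [h1, h2]
        exact ih hpw' _ _ (Or.inr ⟨i, rfl, rfl, fun y hy => hlt y (List.mem_cons_of_mem _ hy)⟩)

-- A's scan equals Python's min(ready, key=lambda i: (priority[i], i))
lemma pvScan_eq_min2? (n : Nat) (arrival prio : List Int) (completed : List Bool) (t : Int) :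
    (pvScan n arrival prio completed t).1 =
      PySem.List.min2? ((pvR n completed).filter (fun i => decide (arrival.getD i 0 ≤ t)))
        (fun i => prio.getD i 0) (fun i => i) := by
  have hE : ((pvR n completed).filter (fun i => decide (arrival.getD i 0 ≤ t))) =
      (List.range n).filter
        (fun i => !completed.getD i false && decide (arrival.getD i 0 ≤ t)) := by
    unfold pvR
    rw [List.filter_filter]
    exact List.filter_congr (fun i _ => Bool.and_comm _ _)
  rw [hE, pvMin2_eq_foldl, pvScan_as_filter]
  exact pvSelFold prio _
    (List.Pairwise.sublist List.filter_sublist List.pairwise_lt_range)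
    _ _ (Or.inl ⟨rfl, rfl⟩)

lemma pvR_set (n : Nat) (completed : List Bool) (j : Nat) (hj : j < n)
    (hlen : completed.length = n) :
    pvR n (completed.set j true) = (pvR n completed).erase j := by
  rw [(pvR_nodup n completed).erase_eq_filter j]
  unfold pvR
  rw [List.filter_filter]
  apply List.filter_congr
  intro i hi
  by_cases hij : i = j
  · subst hij
    have hset : (completed.set i true).getD i false = true := by
      rw [List.getD_eq_getElem?_getD, List.getElem?_set]
      simp [hlen, hj]
    rw [List.getD_eq_getElem?_getD] at hset
    simp [hset]
  · have hset : (completed.set j true).getD i false = completed.getD i false := by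
      rw [List.getD_eq_getElem?_getD, List.getElem?_set, if_neg (fun h => hij h.symm)]
      rw [List.getD_eq_getElem?_getD]
    rw [hset]
    cases h : completed.getD i false <;> simp [hij, h, bne]

lemma pvR_nil (n : Nat) (completed : List Bool) (count : Nat) (hlen : completed.length = n)
    (hcount : completed.count true = count) (hc : ¬ count < n) : pvR n completed = [] := by
  have hle : completed.count true ≤ completed.length := List.count_le_length
  have hcn : completed.count true = completed.length := by omega
  have hall := List.count_eq_length.mp hcn
  unfold pvR
  rw [List.filter_eq_nil_iff]
  intro i hi
  have hin : i < completed.length := by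
    have := List.mem_range.mp hi
    omega
  have hgt : completed[i]?.getD false = true := by
    rw [List.getElem?_eq_getElem hin]
    simpa using (hall _ (List.getElem_mem hin)).symm
  simp [hgt]

-- B makes the same move from t as from t+1 while nobody has arrived
lemma pvBLoop_idle (arrival burst prio : List Int) (waiting start : List Int)
    (remaining : List Nat) (t : Int) (hne : remaining ≠ [])
    (hrdy : remaining.filter (fun i => decide (arrival.getD i 0 ≤ t)) = []) :
    pvBLoop arrival burst prio waiting start remaining t =
      pvBLoop arrival burst prio waiting start remaining (t + 1) := by
  cases remaining with
  | nil => exact absurd rfl hne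
  | cons x rest =>
    rw [pvBLoop, pvBLoop]
    have hall : ∀ i ∈ x :: rest, ¬ arrival.getD i 0 ≤ t := by
      intro i hi
      have := List.filter_eq_nil_iff.mp hrdy i hi
      simpa using this
    simp only [hrdy]
    by_cases h2 : (x :: rest).filter (fun i => decide (arrival.getD i 0 ≤ t + 1)) = []
    · simp only [h2, List.isEmpty_nil]
      simp
    · -- some process arrives exactly at t+1, and it is the earliest arrival
      have hm : (((x :: rest).map (fun i => arrival.getD i 0)).min?).getD 0 = t + 1 := by
        rcases hmin : ((x :: rest).map (fun i => arrival.getD i 0)).min? with _ | m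
        · rw [List.min?_eq_none_iff] at hmin
          simp at hmin
        · obtain ⟨hmem, hle⟩ := List.min?_eq_some_iff.mp hmin
          obtain ⟨i0, hi0, hv0⟩ := List.mem_map.mp hmem
          obtain ⟨i1, hi1, hp1⟩ : ∃ i1 ∈ x :: rest, arrival.getD i1 0 ≤ t + 1 := by
            by_contra hno
            push_neg at hno
            exact h2 (List.filter_eq_nil_iff.mpr (by intro a ha; simpa using hno a ha))
          have h1 := hle _ (List.mem_map.mpr ⟨i1, hi1, rfl⟩)
          have h0 := hall i0 hi0
          simp only [Option.getD_some]
          omega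
      have hiE2 : ((x :: rest).filter (fun i => decide (arrival.getD i 0 ≤ t + 1))).isEmpty
          = false := by
        cases h : (x :: rest).filter (fun i => decide (arrival.getD i 0 ≤ t + 1)) with
        | nil => exact absurd h h2
        | cons a l => rfl
      simp only [hm, hiE2]
      simp

-- the simulation: A's loop state (completed, count) corresponds to B's remaining = pvR
lemma pvSim (n : Nat) (arrival burst prio : List Int) :
    ∀ (K : Nat) (completed : List Bool), (pvR n completed).length ≤ K →
    ∀ (G : Nat) (t : Int), (pvMinArr n arrival completed - t).toNat ≤ G →
    ∀ (count : Nat) (waiting start : List Int)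
      (hlen : completed.length = n) (hcount : completed.count true = count),
      pvALoop n arrival burst prio waiting start completed t count hlen hcount =
        pvBLoop arrival burst prio waiting start (pvR n completed) t := by
  intro K
  induction K using Nat.strong_induction_on with
  | _ K ihK =>
  intro completed hK G
  induction G using Nat.strong_induction_on with
  | _ G ihG =>
  intro t hG count waiting start hlen hcount
  by_cases hc : count < n
  · rcases hidx : (pvScan n arrival prio completed t).1 with _ | j
    · -- idle step: nobody has arrived; A adds one tick, B is unchanged by one tick
      have hready : (pvR n completed).filter (fun i => decide (arrival.getD i 0 ≤ t)) = [] := by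
        rw [List.filter_eq_nil_iff]
        intro i hiR
        obtain ⟨hir, hiu⟩ := List.mem_filter.mp hiR
        have := pvScan_none n arrival prio completed t hidx i (List.mem_range.mp hir)
          (by simpa using hiu)
        rw [List.getD_eq_getElem?_getD] at this
        simp
        omega
      have hRne : pvR n completed ≠ [] := by
        obtain ⟨i0, hi0, hf0⟩ := pvExistsFalse completed count hcount (by omega)
        intro hnil
        have hmem : i0 ∈ pvR n completed :=
          List.mem_filter.mpr ⟨List.mem_range.mpr (by omega),
            by rw [List.getD_eq_getElem?_getD] at hf0; simp [hf0]⟩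
        rw [hnil] at hmem
        exact List.not_mem_nil hmem
      have hgt : t < pvMinArr n arrival completed :=
        pvMinArr_gt n arrival prio completed t count hlen hcount hc hidx
      have hA : pvALoop n arrival burst prio waiting start completed t count hlen hcount =
          pvALoop n arrival burst prio waiting start completed (t + 1) count hlen hcount := by
        rw [pvALoop]
        simp only [hc, dif_pos]
        split
        · rename_i j heq
          rw [hidx] at heq
          cases heq
        · rfl
      rw [hA, pvBLoop_idle arrival burst prio waiting start _ t hRne hready]
      exact ihG ((pvMinArr n arrival completed - (t + 1)).toNat) (by omega) (t + 1)
        (le_refl _) count waiting start hlen hcount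
    · -- select step: both schedule the same process j
      obtain ⟨hjn, hjf, hjarr⟩ := pvScan_some n arrival prio completed t hidx
      have hjR : j ∈ pvR n completed :=
        List.mem_filter.mpr ⟨List.mem_range.mpr hjn,
          by rw [List.getD_eq_getElem?_getD] at hjf; simp [hjf]⟩
      have hmin : PySem.List.min2?
          ((pvR n completed).filter (fun i => decide (arrival.getD i 0 ≤ t)))
          (fun i => prio.getD i 0) (fun i => i) = some j := by
        rw [← pvScan_eq_min2?]
        exact hidx
      have hA : pvALoop n arrival burst prio waiting start completed t count hlen hcount =
          pvALoop n arrival burst prio (waiting.set j (t - arrival.getD j 0)) (start.set j t)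
            (completed.set j true) (t + burst.getD j 0) (count + 1)
            (by simpa using hlen)
            (by rw [pvCountSetTrue completed j (by omega) hjf, hcount]) := by
        rw [pvALoop]
        simp only [hc, dif_pos]
        split
        · rename_i j' heq
          rw [hidx] at heq
          cases heq
          rfl
        · rename_i heq
          rw [hidx] at heq
          cases heq
      have hB : pvBLoop arrival burst prio waiting start (pvR n completed) t =
          pvBLoop arrival burst prio (waiting.set j (t - arrival.getD j 0)) (start.set j t)
            ((pvR n completed).erase j) (t + burst.getD j 0) := by
        obtain ⟨x, rest, hxr⟩ : ∃ x rest, pvR n completed = x :: rest := by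
          cases hR : pvR n completed with
          | nil => rw [hR] at hjR; exact absurd hjR List.not_mem_nil
          | cons x rest => exact ⟨x, rest, rfl⟩
        have hEne : ((pvR n completed).filter
            (fun i => decide (arrival.getD i 0 ≤ t))).isEmpty = false := by
          cases hE0 : (pvR n completed).filter (fun i => decide (arrival.getD i 0 ≤ t)) with
          | nil => rw [hE0] at hmin; cases hmin
          | cons a l => rfl
        have hrm : PySem.List.remove? (pvR n completed) j = some ((pvR n completed).erase j) :=
          PySem.List.remove?_eq_some_erase _ _ hjR
        rw [hxr] at hmin hEne hrm ⊢
        rw [pvBLoop]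
        rw [hEne, if_neg Bool.false_ne_true]
        split
        · rename_i heq
          have heq' : PySem.List.min2?
              ((x :: rest).filter (fun i => decide (arrival.getD i 0 ≤ t)))
              (fun i => prio.getD i 0) (fun i => i) = none := heq
          rw [hmin] at heq'
          cases heq'
        · rename_i j' heq
          have heq' : PySem.List.min2?
              ((x :: rest).filter (fun i => decide (arrival.getD i 0 ≤ t)))
              (fun i => prio.getD i 0) (fun i => i) = some j' := heq
          rw [hmin] at heq'
          obtain rfl : j = j' := Option.some.inj heq'
          split
          · rename_i heq2
            have heq2' : PySem.List.remove? (x :: rest) j = none := heq2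
            rw [hrm] at heq2'
            cases heq2'
          · rename_i rem heq2
            have heq2' : PySem.List.remove? (x :: rest) j = some rem := heq2
            rw [hrm] at heq2'
            obtain rfl : (x :: rest).erase j = rem := Option.some.inj heq2'
            rfl
      rw [hA, hB, ← pvR_set n completed j hjn hlen]
      have hlt : (pvR n (completed.set j true)).length < K := by
        rw [pvR_set n completed j hjn hlen]
        have hRlen : 0 < (pvR n completed).length := List.length_pos_of_mem hjR
        have := List.length_erase_of_mem hjR
        omega
      exact ihK ((pvR n (completed.set j true)).length) (by omega) (completed.set j true)
        (le_refl _) ((pvMinArr n arrival (completed.set j true) - (t + burst.getD j 0)).toNat)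
        (t + burst.getD j 0) (le_refl _) (count + 1) _ _ _ _
  · -- all processes scheduled: both sides return (waiting, start)
    rw [pvR_nil n completed count hlen hcount hc, pvALoop, pvBLoop]
    simp [hc]

-- ===== VERDICT (by name: the statement is the Claim_ definition above) =====
theorem priority_non_preemptive_spec : Claim_equal_priority_non_preemptive := by
  intro processes arrivalTime burstTime priority _ _
  unfold Spec_priority_non_preemptive priority_non_preemptive priority_non_preemptive_alt
  have hR0 : pvR processes.length (List.replicate processes.length false) =
      List.range processes.length := by
    unfold pvR
    apply List.filter_eq_self.mpr
    intro i hi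
    simp [List.mem_range.mp hi]
  show pvALoop processes.length arrivalTime burstTime priority
      (List.replicate processes.length 0) (List.replicate processes.length 0)
      (List.replicate processes.length false) 0 0 (by simp) (by simp [List.count_replicate]) =
    pvBLoop arrivalTime burstTime priority (List.replicate processes.length 0)
      (List.replicate processes.length 0) (List.range processes.length) 0
  rw [← hR0]
  exact pvSim processes.length arrivalTime burstTime priority
    ((pvR processes.length (List.replicate processes.length false)).length) _ (le_refl _)
    ((pvMinArr processes.length arrivalTime (List.replicate processes.length false) - 0).toNat)
    0 (le_refl _) 0 _ _ _ _
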